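-- pv_equiv track=rewrite | github.com/chaychuakip-a11y/ubctc | 3_ub_fb40/2_train/decode_wav.py | phones_to_words
-- ===== SOURCE A (Python) =====
-- def _build_phone2words(lex: dict) -> dict:
--     """
--     构建反向索引: phone_tuple -> [word, ...].
--     用于 phone 序列 → word 序列的贪婪匹配.
--     """
--     p2w: dict = {}
--     for word, prons in lex.items():
--         for pron in prons:
--             p2w.setdefault(pron, []).append(word)
--     return p2w
--
-- def phones_to_words(phones: list, lex: dict) -> list:
--     """
--     贪婪最长匹配: 将 phone 序列转换为 word 序列.
--
--     从左到右, 每次尝试最长能匹配到词典的 phone 子串.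
--     若某段无法匹配, 以 <ph1+ph2+...> 形式输出原始 phones.
--
--     Args:
--         phones : List[str]  phone 序列
--         lex    : {word -> [phone_tuple, ...]}
--
--     Returns:
--         words  : List[str]  word 序列
--     """
--     p2w = _build_phone2words(lex)
--     words = []
--     i = 0
--     # 最长 phone 串长度 (搜索上界)
--     max_pron_len = max((len(p) for prons in lex.values() for p in prons), default=1)
--
--     while i < len(phones):
--         matched = False
--         # 从最长到最短尝试匹配
--         for length in range(min(max_pron_len, len(phones) - i), 0, -1):
--             chunk = tuple(phones[i:i + length])
--             if chunk in p2w: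
--                 words.append(p2w[chunk][0])   # 取第一个匹配词
--                 i += length
--                 matched = True
--                 break
--         if not matched:
--             # 无法匹配, 输出原始 phone 并跳过
--             words.append(f'<{phones[i]}>')
--             i += 1
--
--     return words
-- ===== SOURCE B (Python) =====
-- def phones_to_words(phones: list, lex: dict) -> list:
--     """
--     Greedy longest-match, one forward scan per position.
--
--     Instead of trying every length from longest to shortest with a dict of
--     full pronunciations, build once:
--       * first    : pron_tuple -> first word having that pron
--       * prefixes : set of every non-empty proper-or-full prefix of any pron
--     and at each position extend the current chunk phone by phone while it is
--     still a prefix of some pronunciation, remembering the longest full match.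
--     """
--     first = {}
--     prefixes = set()
--     for word, prons in lex.items():
--         for pron in prons:
--             t = tuple(pron)
--             if t not in first:
--                 first[t] = word
--             for k in range(1, len(t) + 1):
--                 prefixes.add(t[:k])
--
--     words = []
--     n = len(phones)
--     i = 0
--     while i < n:
--         best = None
--         cur = ()
--         j = i
--         while j < n:
--             cur = cur + (phones[j],)
--             if cur not in prefixes:
--                 break
--             if cur in first:
--                 best = (first[cur], j + 1 - i)
--             j += 1
--         if best is None:
--             words.append(f'<{phones[i]}>')
--             i += 1
--         else:
--             words.append(best[0])
--             i += best[1]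
--     return words
-- ===== Notes on version B (the rewrite author's own statement) =====
-- stated objective: alternative
-- what changed: A retries every length from longest to shortest at each position against a pron->words dict; B builds a first-word dict plus the set of all non-empty pronunciation prefixes once and does a single forward extension scan per position, keeping the longest full match.
import Mathlib
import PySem

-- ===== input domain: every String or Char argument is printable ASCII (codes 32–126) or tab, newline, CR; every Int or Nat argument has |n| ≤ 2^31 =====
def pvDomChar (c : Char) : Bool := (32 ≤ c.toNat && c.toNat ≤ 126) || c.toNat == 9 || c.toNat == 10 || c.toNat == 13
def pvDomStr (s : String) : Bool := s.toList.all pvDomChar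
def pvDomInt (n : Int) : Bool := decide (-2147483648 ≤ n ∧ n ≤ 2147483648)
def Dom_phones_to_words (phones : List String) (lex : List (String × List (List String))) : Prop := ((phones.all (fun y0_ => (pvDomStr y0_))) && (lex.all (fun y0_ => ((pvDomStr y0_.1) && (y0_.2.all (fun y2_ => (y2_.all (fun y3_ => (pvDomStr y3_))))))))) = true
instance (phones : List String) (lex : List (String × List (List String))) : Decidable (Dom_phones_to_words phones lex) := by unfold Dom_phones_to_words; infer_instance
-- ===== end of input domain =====

-- B replaces A's per-position longest-to-shortest rescan with a single forward scan over a
-- prefix set (objective: alternative algorithm). The return value is proved equal on all inputs.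

-- ===== PORT A =====
-- _build_phone2words: p2w.setdefault(pron, []).append(word)
def pvBuildP2W (lex : List (String × List (List String))) : PySem.Dict (List String) (List String) :=
  lex.foldl
    (fun d pr => pr.2.foldl (fun d pron => d.insert pron (d.getD pron [] ++ [pr.1])) d)
    PySem.Dict.empty

-- max((len(p) for prons in lex.values() for p in prons), default=1)
def pvMaxPronLen (lex : List (String × List (List String))) : Int :=
  PySem.List.maxD (lex.flatMap (fun pr => pr.2.map (fun p => PySem.List.len p))) (fun x => x) 1

-- the inner 'for length in range(min(max_pron_len, len(phones)-i), 0, -1): … break' loop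
def pvFindA (p2w : PySem.Dict (List String) (List String)) (phones : List String) (i : Nat) :
    Nat → Option (List String × Nat)
  | 0 => none
  | (l+1) =>
    match p2w.get? (PySem.List.slice phones (some (i : Int)) (some ((i : Int) + ((l+1 : Nat) : Int)))) with
    | some ws => some (ws, l+1)
    | none => pvFindA p2w phones i l

-- the 'while i < len(phones)' loop of phones_to_words; the fuel argument (phones.length at
-- the call site) only makes the recursion structural: i grows by at least 1 per iteration,
-- so the fuel is never exhausted while i < len(phones)
def pvLoopA (p2w : PySem.Dict (List String) (List String)) (maxLen : Int) (phones : List String) :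
    Nat → Nat → List String
  | 0, _ => []
  | (fuel+1), i =>
    if h : i < phones.length then
      match pvFindA p2w phones i (min maxLen ((phones.length : Int) - (i : Int))).toNat with
      | some (ws, l) => ws.headD "" :: pvLoopA p2w maxLen phones fuel (i + l)
      | none => ("<" ++ phones[i] ++ ">") :: pvLoopA p2w maxLen phones fuel (i + 1)
    else []

def phones_to_words (phones : List String) (lex : List (String × List (List String))) : List String :=
  pvLoopA (pvBuildP2W lex) (pvMaxPronLen lex) phones phones.length 0

-- ===== PORT B =====
-- one pass over lex building (first : pron -> first word, prefixes : set of non-empty prefixes)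
def pvBuildB (lex : List (String × List (List String))) :
    PySem.Dict (List String) String × PySem.Set (List String) :=
  lex.foldl
    (fun st pr =>
      pr.2.foldl
        (fun st pron =>
          ((if st.1.contains pron then st.1 else st.1.insert pron pr.1),
           (PySem.List.pyRange 1 (PySem.List.len pron + 1) 1).foldl
             (fun s k => PySem.Set.add s (PySem.List.slice pron none (some k))) st.2))
        st)
    (PySem.Dict.empty, PySem.Set.empty)

-- the inner 'while j < n' forward scan of B (fuel-guarded: j grows by 1 per iteration)
def pvWalkB (first : PySem.Dict (List String) String) (prefs : PySem.Set (List String))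
    (phones : List String) (i : Nat) :
    Nat → Nat → List String → Option (String × Nat) → Option (String × Nat)
  | 0, _, _, best => best
  | (fuel+1), j, cur, best =>
    if h : j < phones.length then
      if PySem.Set.contains prefs (cur ++ [phones[j]]) then
        pvWalkB first prefs phones i fuel (j+1) (cur ++ [phones[j]])
          (match first.get? (cur ++ [phones[j]]) with
           | some w => some (w, j + 1 - i)
           | none => best)
      else best
    else best

-- the 'while i < n' loop of B (same fuel guard as pvLoopA)
def pvLoopB (first : PySem.Dict (List String) String) (prefs : PySem.Set (List String))
    (phones : List String) : Nat → Nat → List String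
  | 0, _ => []
  | (fuel+1), i =>
    if h : i < phones.length then
      match pvWalkB first prefs phones i phones.length i [] none with
      | some (w, l) => w :: pvLoopB first prefs phones fuel (i + l)
      | none => ("<" ++ phones[i] ++ ">") :: pvLoopB first prefs phones fuel (i + 1)
    else []

def phones_to_words_alt (phones : List String) (lex : List (String × List (List String))) :
    List String :=
  pvLoopB (pvBuildB lex).1 (pvBuildB lex).2 phones phones.length 0

-- ===== PRECONDITION & SPEC =====
def Spec_phones_to_words (phones : List String) (lex : List (String × List (List String))) (out : List String) : Prop := out = phones_to_words_alt phones lex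
instance (phones : List String) (lex : List (String × List (List String))) (out : List String) : Decidable (Spec_phones_to_words phones lex out) := by unfold Spec_phones_to_words; infer_instance

-- ===== CLAIM (what is proved, stated in full; the proofs are below) =====
def Claim_equal_phones_to_words : Prop := ∀ (phones : List String) (lex : List (String × List (List String))), Dom_phones_to_words phones lex → Spec_phones_to_words phones lex (phones_to_words phones lex)

-- ===== LEMMAS AND PROOFS =====

-- the (pron, word) pairs in the order both builds visit them
def pvPairs (lex : List (String × List (List String))) : List (List String × String) :=
  lex.flatMap (fun pr => pr.2.map (fun p => (p, pr.1)))

def pvStepA (d : PySem.Dict (List String) (List String)) (pw : List String × String) :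
    PySem.Dict (List String) (List String) :=
  d.insert pw.1 (d.getD pw.1 [] ++ [pw.2])

def pvStepB (d : PySem.Dict (List String) String) (pw : List String × String) :
    PySem.Dict (List String) String :=
  if d.contains pw.1 then d else d.insert pw.1 pw.2

def pvStepS (s : PySem.Set (List String)) (pw : List String × String) : PySem.Set (List String) :=
  (PySem.List.pyRange 1 (PySem.List.len pw.1 + 1) 1).foldl
    (fun s k => PySem.Set.add s (PySem.List.slice pw.1 none (some k))) s

theorem pvBuildP2W_flat (lex : List (String × List (List String))) :
    pvBuildP2W lex = (pvPairs lex).foldl pvStepA PySem.Dict.empty := by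
  rw [pvBuildP2W]
  generalize PySem.Dict.empty = d
  induction lex generalizing d with
  | nil => simp [pvPairs]
  | cons pr rest ih =>
    simp only [List.foldl_cons, pvPairs, List.flatMap_cons, List.foldl_append, List.foldl_map]
    rw [ih]
    rfl

theorem pvBuildB_inner (w : String) :
    ∀ (prons : List (List String)) (st : PySem.Dict (List String) String × PySem.Set (List String)),
      prons.foldl
        (fun st pron =>
          ((if st.1.contains pron then st.1 else st.1.insert pron w),
           (PySem.List.pyRange 1 (PySem.List.len pron + 1) 1).foldl
             (fun s k => PySem.Set.add s (PySem.List.slice pron none (some k))) st.2))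
        st
      = (prons.foldl (fun d p => pvStepB d (p, w)) st.1,
         prons.foldl (fun s p => pvStepS s (p, w)) st.2) := by
  intro prons
  induction prons with
  | nil => intro st; rfl
  | cons p ps ih =>
    intro st
    simp only [List.foldl_cons]
    rw [ih]
    rfl

theorem pvBuildB_aux (lex : List (String × List (List String))) :
    ∀ (st : PySem.Dict (List String) String × PySem.Set (List String)),
      lex.foldl
        (fun st pr =>
          pr.2.foldl
            (fun st pron =>
              ((if st.1.contains pron then st.1 else st.1.insert pron pr.1),
               (PySem.List.pyRange 1 (PySem.List.len pron + 1) 1).foldl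
                 (fun s k => PySem.Set.add s (PySem.List.slice pron none (some k))) st.2))
            st)
        st
      = ((pvPairs lex).foldl pvStepB st.1, (pvPairs lex).foldl pvStepS st.2) := by
  induction lex with
  | nil => intro st; simp [pvPairs]
  | cons pr rest ih =>
    intro st
    simp only [List.foldl_cons, pvPairs, List.flatMap_cons, List.foldl_append, List.foldl_map]
    rw [pvBuildB_inner, ih]
    rfl

theorem pvBuildB_eq (lex : List (String × List (List String))) :
    pvBuildB lex = ((pvPairs lex).foldl pvStepB PySem.Dict.empty,
                    (pvPairs lex).foldl pvStepS PySem.Set.empty) := by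
  rw [pvBuildB, pvBuildB_aux]


-- relation between A's word-list dict and B's first-word dict
def pvRel : Option (List String) → Option String → Prop
  | none, none => True
  | some ws, some w => ws ≠ [] ∧ ws.headD "" = w
  | _, _ => False

theorem pvHeadD_append (ws l : List String) (d : String) (h : ws ≠ []) :
    (ws ++ l).headD d = ws.headD d := by
  cases ws with
  | nil => exact absurd rfl h
  | cons a t => rfl

theorem pvStep_rel (dA : PySem.Dict (List String) (List String))
    (dB : PySem.Dict (List String) String) (pw : List String × String)
    (h : ∀ k, pvRel (dA.get? k) (dB.get? k)) :
    ∀ q, pvRel ((pvStepA dA pw).get? q) ((pvStepB dB pw).get? q) := by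
  intro q
  by_cases hq : q = pw.1
  · subst hq
    rw [pvStepA, PySem.Dict.get?_insert, if_pos rfl, pvStepB]
    cases hc : dB.contains pw.1 with
    | false =>
      rw [if_neg (by simp)]
      have hBnone : dB.get? pw.1 = none := by
        rw [PySem.Dict.contains_eq_isSome_get?] at hc
        cases hg : dB.get? pw.1 with
        | none => rfl
        | some w => rw [hg] at hc; simp at hc
      have hrel := h pw.1
      rw [hBnone] at hrel
      have hAnone : dA.get? pw.1 = none := by
        cases hg : dA.get? pw.1 with
        | none => rfl
        | some ws => rw [hg] at hrel; exact absurd hrel (by simp [pvRel])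
      rw [PySem.Dict.get?_insert, if_pos rfl, PySem.Dict.getD_eq_get?_getD, hAnone]
      exact ⟨by simp, rfl⟩
    | true =>
      rw [if_pos rfl]
      have hrel := h pw.1
      rw [PySem.Dict.contains_eq_isSome_get?] at hc
      cases hg : dB.get? pw.1 with
      | none => rw [hg] at hc; simp at hc
      | some w0 =>
        rw [hg] at hrel
        cases hgA : dA.get? pw.1 with
        | none => rw [hgA] at hrel; exact absurd hrel (by simp [pvRel])
        | some ws0 =>
          rw [hgA] at hrel
          obtain ⟨hne, hhd⟩ := hrel
          rw [PySem.Dict.getD_eq_get?_getD, hgA]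
          simp only [Option.getD_some]
          exact ⟨by simp, by rw [pvHeadD_append _ _ _ hne, hhd]⟩
  · rw [pvStepA, PySem.Dict.get?_insert, if_neg hq, pvStepB]
    split
    · exact h q
    · rw [PySem.Dict.get?_insert, if_neg hq]; exact h q

theorem pvCorr : ∀ (pairs : List (List String × String))
    (dA : PySem.Dict (List String) (List String)) (dB : PySem.Dict (List String) String),
    (∀ k, pvRel (dA.get? k) (dB.get? k)) →
    ∀ k, pvRel ((pairs.foldl pvStepA dA).get? k) ((pairs.foldl pvStepB dB).get? k) := by
  intro pairs
  induction pairs with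
  | nil => intro dA dB h k; exact h k
  | cons pw rest ih =>
    intro dA dB h k
    simp only [List.foldl_cons]
    exact ih _ _ (pvStep_rel dA dB pw h) k

-- every key of B's dict is one of the prons in lex
theorem pvFirstKey : ∀ (pairs : List (List String × String)) (dB : PySem.Dict (List String) String)
    (k : List String) (w : String),
    (pairs.foldl pvStepB dB).get? k = some w →
    dB.get? k = some w ∨ ∃ pw ∈ pairs, pw.1 = k := by
  intro pairs
  induction pairs with
  | nil => intro dB k w h; exact Or.inl h
  | cons pw rest ih =>
    intro dB k w h
    simp only [List.foldl_cons] at h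
    rcases ih _ _ _ h with h1 | h1
    · rw [pvStepB] at h1
      split at h1
      · exact Or.inl h1
      · by_cases hk : k = pw.1
        · exact Or.inr ⟨pw, by simp, hk.symm⟩
        · rw [PySem.Dict.get?_insert, if_neg hk] at h1; exact Or.inl h1
    · obtain ⟨pw', hmem, hpw⟩ := h1
      exact Or.inr ⟨pw', by simp [hmem], hpw⟩

theorem pvAddFold_mono (g : Int → List String) :
    ∀ (l : List Int) (s : PySem.Set (List String)) (y : List String),
      y ∈ s → y ∈ l.foldl (fun s k => PySem.Set.add s (g k)) s := by
  intro l
  induction l with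
  | nil => intro s y h; exact h
  | cons a l ih =>
    intro s y h
    simp only [List.foldl_cons]
    exact ih _ _ ((PySem.Set.mem_add s (g a) y).mpr (Or.inl h))

theorem pvAddFold_hit (g : Int → List String) :
    ∀ (l : List Int) (s : PySem.Set (List String)) (k0 : Int),
      k0 ∈ l → g k0 ∈ l.foldl (fun s k => PySem.Set.add s (g k)) s := by
  intro l
  induction l with
  | nil => intro s k0 h; simp at h
  | cons a l ih =>
    intro s k0 h
    simp only [List.foldl_cons]
    rcases List.mem_cons.mp h with h | h
    · subst h
      exact pvAddFold_mono g l _ _ ((PySem.Set.mem_add s (g k0) (g k0)).mpr (Or.inr rfl))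
    · exact ih _ _ h

theorem pvFoldS_mono : ∀ (pairs : List (List String × String)) (s : PySem.Set (List String))
    (y : List String), y ∈ s → y ∈ pairs.foldl pvStepS s := by
  intro pairs
  induction pairs with
  | nil => intro s y h; exact h
  | cons pw rest ih =>
    intro s y h
    simp only [List.foldl_cons]
    exact ih _ _ (pvAddFold_mono _ _ _ _ h)

theorem pvStepS_hit (s : PySem.Set (List String)) (pw : List String × String) (t : Nat)
    (h1 : 1 ≤ t) (h2 : t ≤ pw.1.length) : pw.1.take t ∈ pvStepS s pw := by
  rw [pvStepS]
  have hmem : ((t : Nat) : Int) ∈ PySem.List.pyRange 1 (PySem.List.len pw.1 + 1) 1 := by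
    rw [PySem.List.len_eq, PySem.List.mem_pyRange_one]
    refine ⟨by omega, by omega⟩
  have := pvAddFold_hit (fun k => PySem.List.slice pw.1 none (some k)) _ s _ hmem
  simpa [PySem.List.slice_to_natCast] using this

theorem pvPrefsMem : ∀ (pairs : List (List String × String)) (s : PySem.Set (List String))
    (pw : List String × String), pw ∈ pairs → ∀ t, 1 ≤ t → t ≤ pw.1.length →
    pw.1.take t ∈ pairs.foldl pvStepS s := by
  intro pairs
  induction pairs with
  | nil => intro s pw h; simp at h
  | cons pw0 rest ih =>
    intro s pw h t h1 h2
    simp only [List.foldl_cons]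
    rcases List.mem_cons.mp h with h | h
    · subst h
      exact pvFoldS_mono _ _ _ (pvStepS_hit s pw t h1 h2)
    · exact ih _ _ h t h1 h2

theorem pvMaxLen_bound (lex : List (String × List (List String))) (pw : List String × String)
    (h : pw ∈ pvPairs lex) : (pw.1.length : Int) ≤ pvMaxPronLen lex := by
  have hmem : PySem.List.len pw.1 ∈ lex.flatMap (fun pr => pr.2.map (fun p => PySem.List.len p)) := by
    rw [pvPairs] at h
    simp only [List.mem_flatMap, List.mem_map] at h ⊢
    obtain ⟨pr, hpr, p, hp, hep⟩ := h
    exact ⟨pr, hpr, pw.1, by rw [← hep]; exact ⟨hp, rfl⟩⟩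
  rw [pvMaxPronLen, PySem.List.maxD]
  cases hm : PySem.List.max? (lex.flatMap (fun pr => pr.2.map (fun p => PySem.List.len p))) (fun x => x) with
  | none =>
    rw [PySem.List.max?_eq_none_iff] at hm
    rw [hm] at hmem; simp at hmem
  | some m =>
    have := PySem.List.max?_isMax hm _ hmem
    rw [PySem.List.len_eq] at this
    simpa using this

-- chunk lemmas ---------------------------------------------------------------
theorem pvChunk_len (phones : List String) (i t : Nat) (h : i + t ≤ phones.length) :
    ((phones.drop i).take t).length = t := by
  simp only [List.length_take, List.length_drop]
  omega

theorem pvChunk_snoc (phones : List String) (i j : Nat) (h1 : i ≤ j) (h2 : j < phones.length) :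
    (phones.drop i).take (j - i) ++ [phones[j]] = (phones.drop i).take (j - i + 1) := by
  have h3 : i + (j - i) = j := by omega
  rw [List.take_add_one, List.getElem?_drop, h3, List.getElem?_eq_getElem h2]
  rfl

theorem pvChunk_take (phones : List String) (i t t' : Nat) (h : t' ≤ t) :
    ((phones.drop i).take t).take t' = (phones.drop i).take t' := by
  rw [List.take_take, Nat.min_eq_left h]

-- the common reference: greatest full match of length ≤ m --------------------
def pvG (first : PySem.Dict (List String) String) (phones : List String) (i : Nat) :
    Nat → Option (String × Nat)
  | 0 => none
  | (m+1) =>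
    match first.get? ((phones.drop i).take (m+1)) with
    | some w => some (w, m+1)
    | none => pvG first phones i m

theorem pvG_pos (first : PySem.Dict (List String) String) (phones : List String) (i : Nat) :
    ∀ (m : Nat) (w : String) (l : Nat), pvG first phones i m = some (w, l) → 0 < l := by
  intro m
  induction m with
  | zero => intro w l h; simp [pvG] at h
  | succ m ih =>
    intro w l h
    rw [pvG] at h
    cases hg : first.get? ((phones.drop i).take (m+1)) with
    | some w' => rw [hg] at h; simp at h; omega
    | none => rw [hg] at h; exact ih w l h

-- forward overwrite accumulation (the shape of B's walk without the prefix test)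
def pvGA (first : PySem.Dict (List String) String) (phones : List String) (i : Nat) :
    Nat → Nat → Option (String × Nat) → Option (String × Nat)
  | 0, _, b => b
  | (fuel+1), m, b =>
    if m < phones.length - i then
      pvGA first phones i fuel (m+1)
        (match first.get? ((phones.drop i).take (m+1)) with
         | some w => some (w, m+1)
         | none => b)
    else b

theorem pvGA_G (first : PySem.Dict (List String) String) (phones : List String) (i : Nat) :
    ∀ (fuel m : Nat), phones.length - i - m ≤ fuel → m ≤ phones.length - i →
      pvGA first phones i fuel m (pvG first phones i m)
        = pvG first phones i (phones.length - i) := by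
  intro fuel
  induction fuel with
  | zero =>
    intro m hk hm
    have : m = phones.length - i := by omega
    subst this
    rfl
  | succ fuel ih =>
    intro m hk hm
    by_cases hlt : m < phones.length - i
    · rw [pvGA, if_pos hlt]
      have hstep : (match first.get? ((phones.drop i).take (m+1)) with
          | some w => some (w, m+1)
          | none => pvG first phones i m) = pvG first phones i (m+1) := by
        rw [pvG]
      rw [hstep]
      exact ih (m+1) (by omega) (by omega)
    · have : m = phones.length - i := by omega
      subst this
      rw [pvGA, if_neg (by omega)]

theorem pvGA_const (first : PySem.Dict (List String) String) (phones : List String) (i : Nat) :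
    ∀ (fuel m : Nat) (b : Option (String × Nat)),
      (∀ t, m < t → t ≤ phones.length - i → first.get? ((phones.drop i).take t) = none) →
      pvGA first phones i fuel m b = b := by
  intro fuel
  induction fuel with
  | zero => intro m b _; rfl
  | succ fuel ih =>
    intro m b h
    by_cases hlt : m < phones.length - i
    · rw [pvGA, if_pos hlt]
      rw [h (m+1) (by omega) (by omega)]
      exact ih (m+1) b (fun t ht1 ht2 => h t (by omega) ht2)
    · rw [pvGA, if_neg hlt]

theorem pvG_trim (first : PySem.Dict (List String) String) (phones : List String) (i : Nat) :
    ∀ (m2 m1 : Nat), m1 ≤ m2 →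
      (∀ t, m1 < t → t ≤ m2 → first.get? ((phones.drop i).take t) = none) →
      pvG first phones i m2 = pvG first phones i m1 := by
  intro m2
  induction m2 with
  | zero =>
    intro m1 h1 _
    have : m1 = 0 := by omega
    subst this
    rfl
  | succ m2 ih =>
    intro m1 h1 h
    by_cases he : m1 = m2 + 1
    · rw [he]
    · rw [pvG, h (m2+1) (by omega) (by omega)]
      exact ih m1 (by omega) (fun t ht1 ht2 => h t ht1 (by omega))

theorem pvFindA_G (p2w : PySem.Dict (List String) (List String))
    (first : PySem.Dict (List String) String) (phones : List String) (i : Nat)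
    (hInv : ∀ k, pvRel (p2w.get? k) (first.get? k)) :
    ∀ m, (pvFindA p2w phones i m).map (fun x => (x.1.headD "", x.2)) = pvG first phones i m := by
  intro m
  induction m with
  | zero => rfl
  | succ m ih =>
    rw [pvFindA, pvG]
    have hsl : PySem.List.slice phones (some (i : Int)) (some ((i : Int) + ((m+1 : Nat) : Int)))
        = (phones.drop i).take (m+1) := PySem.List.slice_natCast_add phones i (m+1)
    rw [hsl]
    have hrel := hInv ((phones.drop i).take (m+1))
    cases hA : p2w.get? ((phones.drop i).take (m+1)) with
    | some ws =>
      rw [hA] at hrel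
      cases hB : first.get? ((phones.drop i).take (m+1)) with
      | none => rw [hB] at hrel; exact absurd hrel (by simp [pvRel])
      | some w =>
        rw [hB] at hrel
        simp only [Option.map_some]
        rw [hrel.2]
    | none =>
      rw [hA] at hrel
      cases hB : first.get? ((phones.drop i).take (m+1)) with
      | some w => rw [hB] at hrel; exact absurd hrel (by simp [pvRel])
      | none => exact ih

theorem pvWalk_G (first : PySem.Dict (List String) String) (prefs : PySem.Set (List String))
    (phones : List String) (i : Nat)
    (hKeyPref : ∀ k w, first.get? k = some w → ∀ t, 1 ≤ t → t ≤ k.length →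
      PySem.Set.contains prefs (k.take t) = true) :
    ∀ (fuel j : Nat) (b : Option (String × Nat)), i ≤ j →
      pvWalkB first prefs phones i fuel j ((phones.drop i).take (j - i)) b
        = pvGA first phones i fuel (j - i) b := by
  intro fuel
  induction fuel with
  | zero => intro j b _; rfl
  | succ fuel ih =>
    intro j b hij
    by_cases hj : j < phones.length
    · rw [pvWalkB, dif_pos hj]
      rw [pvChunk_snoc phones i j hij hj]
      by_cases hc : PySem.Set.contains prefs ((phones.drop i).take (j - i + 1)) = true
      · rw [if_pos hc]
        have hj1 : j + 1 - i = j - i + 1 := by omega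
        rw [hj1]
        rw [pvGA, if_pos (by omega)]
        have H := ih (j+1) (match first.get? ((phones.drop i).take (j - i + 1)) with
          | some w => some (w, j - i + 1)
          | none => b) (by omega)
        rw [hj1] at H
        exact H
      · rw [if_neg hc]
        rw [pvGA_const first phones i (fuel+1) (j - i) b]
        intro t ht1 ht2
        cases hg : first.get? ((phones.drop i).take t) with
        | none => rfl
        | some w =>
          exfalso
          have hlen : ((phones.drop i).take t).length = t := pvChunk_len phones i t (by omega)
          have := hKeyPref _ _ hg (j - i + 1) (by omega) (by omega)
          rw [pvChunk_take phones i t (j - i + 1) (by omega)] at this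
          exact hc this
    · rw [pvWalkB, dif_neg hj, pvGA, if_neg (by omega)]

-- the main loop equality -----------------------------------------------------
theorem pvLoops_eq (p2w : PySem.Dict (List String) (List String))
    (first : PySem.Dict (List String) String) (prefs : PySem.Set (List String))
    (maxLen : Int) (phones : List String)
    (hInv : ∀ k, pvRel (p2w.get? k) (first.get? k))
    (hKeyPref : ∀ k w, first.get? k = some w → ∀ t, 1 ≤ t → t ≤ k.length →
      PySem.Set.contains prefs (k.take t) = true)
    (hKeyLen : ∀ k w, first.get? k = some w → (k.length : Int) ≤ maxLen) :
    ∀ (fuel i : Nat),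
      pvLoopA p2w maxLen phones fuel i = pvLoopB first prefs phones fuel i := by
  intro fuel
  induction fuel with
  | zero => intro i; rfl
  | succ fuel ih =>
    intro i
    by_cases hi : i < phones.length
    · have hB : pvWalkB first prefs phones i phones.length i [] none
          = pvG first phones i (phones.length - i) := by
        have h0 := pvWalk_G first prefs phones i hKeyPref phones.length i none (le_refl i)
        simp only [Nat.sub_self, List.take_zero] at h0
        rw [h0]
        have := pvGA_G first phones i phones.length 0 (by omega) (by omega)
        simpa [pvG] using this
      set L : Nat := (min maxLen ((phones.length : Int) - (i : Int))).toNat with hL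
      have hLle : L ≤ phones.length - i := by omega
      have hA : (pvFindA p2w phones i L).map (fun x => (x.1.headD "", x.2))
          = pvG first phones i (phones.length - i) := by
        rw [pvFindA_G p2w first phones i hInv L]
        refine (pvG_trim first phones i (phones.length - i) L hLle ?_).symm
        intro t ht1 ht2
        cases hg : first.get? ((phones.drop i).take t) with
        | none => rfl
        | some w =>
          exfalso
          have hlen : ((phones.drop i).take t).length = t := pvChunk_len phones i t (by omega)
          have hb := hKeyLen _ _ hg
          rw [hlen] at hb
          omega
      rw [pvLoopA, dif_pos hi, pvLoopB, dif_pos hi]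
      cases hg : pvG first phones i (phones.length - i) with
      | none =>
        rw [hg] at hA hB
        have hAn : pvFindA p2w phones i L = none := by
          cases hfa : pvFindA p2w phones i L with
          | none => rfl
          | some a => rw [hfa, Option.map_some] at hA; exact absurd hA (by simp)
        split
        next ws la hfa => rw [hAn] at hfa; cases hfa
        next _ =>
          split
          next w l hwb => rw [hB] at hwb; cases hwb
          next _ => exact congrArg _ (ih (i+1))
      | some wl =>
        obtain ⟨w, l⟩ := wl
        rw [hg] at hA hB
        have hfa' : ∃ ws, pvFindA p2w phones i L = some (ws, l) ∧ ws.headD "" = w := by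
          cases hfa : pvFindA p2w phones i L with
          | none => rw [hfa] at hA; simp at hA
          | some a =>
            obtain ⟨ws, la⟩ := a
            rw [hfa, Option.map_some] at hA
            have h2 := Option.some.inj hA
            rw [Prod.mk.injEq] at h2
            exact ⟨ws, by rw [← h2.2], h2.1⟩
        obtain ⟨ws, hfa, hws⟩ := hfa'
        have hl : 0 < l := pvG_pos first phones i _ w l hg
        split
        next ws' la' heq =>
          rw [hfa] at heq
          have h2 := Option.some.inj heq
          rw [Prod.mk.injEq] at h2
          obtain ⟨hws', hla'⟩ := h2
          split
          next w' l' hwb =>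
            rw [hB] at hwb
            have h3 := Option.some.inj hwb
            rw [Prod.mk.injEq] at h3
            obtain ⟨hw', hl'⟩ := h3
            rw [← hws', ← hla', ← hw', ← hl', hws]
            exact congrArg _ (ih (i + l))
          next hwb => rw [hB] at hwb; cases hwb
        next heq => rw [hfa] at heq; cases heq
    · rw [pvLoopA, dif_neg hi, pvLoopB, dif_neg hi]

-- ===== VERDICT (by name: the statement is the Claim_ definition above) =====
theorem phones_to_words_spec : Claim_equal_phones_to_words := by
  intro phones lex _
  unfold Spec_phones_to_words phones_to_words phones_to_words_alt
  rw [pvBuildP2W_flat, pvBuildB_eq]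
  have hInv : ∀ k, pvRel (((pvPairs lex).foldl pvStepA PySem.Dict.empty).get? k)
      (((pvPairs lex).foldl pvStepB PySem.Dict.empty).get? k) := by
    apply pvCorr
    intro k
    simp [PySem.Dict.get?_empty, pvRel]
  have hFirstKey : ∀ k w, ((pvPairs lex).foldl pvStepB PySem.Dict.empty).get? k = some w →
      ∃ pw ∈ pvPairs lex, pw.1 = k := by
    intro k w h
    rcases pvFirstKey _ _ _ _ h with h1 | h1
    · rw [PySem.Dict.get?_empty] at h1; exact absurd h1 (by simp)
    · exact h1
  apply pvLoops_eq _ _ _ _ _ hInv ?_ ?_ phones.length 0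
  · intro k w h t ht1 ht2
    obtain ⟨pw, hmem, hpw⟩ := hFirstKey k w h
    rw [PySem.Set.contains_iff]
    rw [← hpw]
    exact pvPrefsMem _ _ _ hmem t ht1 (by rw [hpw]; exact ht2)
  · intro k w h
    obtain ⟨pw, hmem, hpw⟩ := hFirstKey k w h
    rw [← hpw]
    exact pvMaxLen_bound lex pw hmem
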